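-- pv_equiv track=rewrite | github.com/haegomm/Algorithm | 프로그래머스/lv1/42862. 체육복/체육복.py | solution
-- ===== SOURCE A (Python) =====
-- def solution(n, lost, reserve):
--     lost, reserve = list(set(lost) - set(reserve)), list(set(reserve) - set(lost))
--     reserve.sort()
--     no = len(lost)
--
--     for r in reserve:
--
--         if r - 1 in lost:
--             lost.remove(r - 1)
--             no -= 1
--
--         else:
--             if r + 1 in lost:
--                 lost.remove(r + 1)
--                 no -= 1
--
--     answer = n - no
--
--     return answer
-- ===== SOURCE B (Python) =====
-- def solution(n, lost, reserve):
--     # Two-pointer merge over the two sorted disjoint sets instead of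
--     # membership scans with list.remove.
--     L = sorted(set(lost) - set(reserve))
--     R = sorted(set(reserve) - set(lost))
--     matched = 0
--     i = j = 0
--     while i < len(L) and j < len(R):
--         if R[j] < L[i] - 1:
--             j += 1
--         elif R[j] > L[i] + 1:
--             i += 1
--         else:
--             matched += 1
--             i += 1
--             j += 1
--     return n - len(L) + matched
-- ===== Notes on version B (the rewrite author's own statement) =====
-- stated objective: faster
-- what changed: Replaces A's giver-centric greedy (for each sorted reserve element, a membership scan plus list.remove over the lost list) with a two-pointer merge over both sorted set differences, eliminating the inner scans.
import Mathlib
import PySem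

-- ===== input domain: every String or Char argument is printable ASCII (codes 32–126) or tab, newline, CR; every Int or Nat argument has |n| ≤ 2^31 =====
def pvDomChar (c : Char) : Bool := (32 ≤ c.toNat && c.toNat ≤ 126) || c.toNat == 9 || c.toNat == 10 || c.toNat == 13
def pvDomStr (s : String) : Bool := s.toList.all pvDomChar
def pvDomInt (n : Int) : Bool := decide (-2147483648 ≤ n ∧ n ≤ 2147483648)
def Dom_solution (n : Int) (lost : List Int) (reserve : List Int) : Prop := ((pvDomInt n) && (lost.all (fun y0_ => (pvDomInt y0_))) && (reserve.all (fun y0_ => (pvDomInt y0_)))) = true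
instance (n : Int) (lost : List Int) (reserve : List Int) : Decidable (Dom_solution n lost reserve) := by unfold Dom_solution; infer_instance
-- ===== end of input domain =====

-- B replaces A's giver-centric greedy (membership scan + list.remove per reserve element)
-- with a two-pointer merge over both sorted set differences; same return value, proved below.

-- ===== PORT A =====
-- for r in reserve: if r-1 in lost: lost.remove(r-1); no -= 1 elif r+1 in lost: …
-- lost.remove(v) under the membership guard is exactly List.erase (PySem.List.remove?_eq_some_erase).
def solution (n : Int) (lost : List Int) (reserve : List Int) : Int :=
  let lost1 : List Int := PySem.Set.diff (PySem.Set.ofList lost) (PySem.Set.ofList reserve)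
  let reserve1 : List Int :=
    PySem.List.sorted (PySem.Set.diff (PySem.Set.ofList reserve) (PySem.Set.ofList lost)) (fun x => x) false
  let no : Int := (lost1.length : Int)
  let st := reserve1.foldl
    (fun (st : List Int × Int) r =>
      if (r - 1) ∈ st.1 then (st.1.erase (r - 1), st.2 - 1)
      else if (r + 1) ∈ st.1 then (st.1.erase (r + 1), st.2 - 1)
      else st) (lost1, no)
  n - st.2

-- ===== PORT B =====
-- the two-pointer while loop of Source B, as structural recursion on the two sorted lists
def tpB : List Int → List Int → Int
  | [], _ => 0
  | _ :: _, [] => 0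
  | l :: L, r :: R =>
    if r < l - 1 then tpB (l :: L) R
    else if r > l + 1 then tpB L (r :: R)
    else 1 + tpB L R
termination_by L R => L.length + R.length

def solution_alt (n : Int) (lost : List Int) (reserve : List Int) : Int :=
  let L : List Int :=
    PySem.List.sorted (PySem.Set.diff (PySem.Set.ofList lost) (PySem.Set.ofList reserve)) (fun x => x) false
  let R : List Int :=
    PySem.List.sorted (PySem.Set.diff (PySem.Set.ofList reserve) (PySem.Set.ofList lost)) (fun x => x) false
  n - (L.length : Int) + tpB L R

-- ===== PRECONDITION & SPEC =====
def Spec_solution (n : Int) (lost : List Int) (reserve : List Int) (out : Int) : Prop := out = solution_alt n lost reserve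
instance (n : Int) (lost : List Int) (reserve : List Int) (out : Int) : Decidable (Spec_solution n lost reserve out) := by unfold Spec_solution; infer_instance

-- ===== CLAIM (what is proved, stated in full; the proofs are below) =====
def Claim_equal_solution : Prop := ∀ (n : Int) (lost : List Int) (reserve : List Int), Dom_solution n lost reserve → Spec_solution n lost reserve (solution n lost reserve)

-- ===== LEMMAS AND PROOFS =====

-- A's matched count, extracted from the fold
def gA : List Int → List Int → Int
  | _, [] => 0
  | L, r :: R =>
    if (r - 1) ∈ L then 1 + gA (L.erase (r - 1)) R
    else if (r + 1) ∈ L then 1 + gA (L.erase (r + 1)) R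
    else gA L R

theorem foldA_eq (R : List Int) : ∀ (L : List Int) (c : Int),
    (R.foldl (fun (st : List Int × Int) r =>
      if (r - 1) ∈ st.1 then (st.1.erase (r - 1), st.2 - 1)
      else if (r + 1) ∈ st.1 then (st.1.erase (r + 1), st.2 - 1)
      else st) (L, c)).2 = c - gA L R := by
  induction R with
  | nil => intro L c; simp [gA]
  | cons r R ih =>
    intro L c
    simp only [List.foldl_cons, gA]
    by_cases h1 : (r - 1) ∈ L
    · simp only [h1, if_true]; rw [ih]; omega
    · by_cases h2 : (r + 1) ∈ L
      · simp only [h1, h2, if_true, if_false]; rw [ih]; omega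
      · simp only [h1, h2, if_false]; rw [ih]

theorem gA_perm (R : List Int) : ∀ {L L' : List Int}, L.Perm L' → gA L R = gA L' R := by
  induction R with
  | nil => intro L L' _; simp [gA]
  | cons r R ih =>
    intro L L' h
    simp only [gA]
    by_cases h1 : (r - 1) ∈ L
    · rw [if_pos h1, if_pos (h.mem_iff.mp h1), ih (h.erase _)]
    · rw [if_neg h1, if_neg (fun hx => h1 (h.mem_iff.mpr hx))]
      by_cases h2 : (r + 1) ∈ L
      · rw [if_pos h2, if_pos (h.mem_iff.mp h2), ih (h.erase _)]
      · rw [if_neg h2, if_neg (fun hx => h2 (h.mem_iff.mpr hx)), ih h]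

theorem tpB_nil_right (L : List Int) : tpB L [] = 0 := by
  cases L <;> simp [tpB]

theorem tpB_drop_head (l : Int) (L R : List Int) (h : ∀ r' ∈ R, l + 1 < r') :
    tpB (l :: L) R = tpB L R := by
  cases R with
  | nil => simp [tpB_nil_right]
  | cons r' R' =>
    have := h r' List.mem_cons_self
    rw [tpB, if_neg (by omega), if_pos (by omega)]

theorem tpB_match_lo : ∀ (L : List Int) (R : List Int) (r : Int),
    L.Pairwise (· < ·) → (∀ r' ∈ R, r < r') → (r - 1) ∈ L →
    tpB L (r :: R) = 1 + tpB (L.erase (r - 1)) R := by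
  intro L
  induction L with
  | nil => intro R r _ _ h; cases h
  | cons l L ih =>
    intro R r hp hgt hm
    by_cases he : l = r - 1
    · subst he
      rw [tpB, if_neg (by omega), if_neg (by omega), List.erase_cons_head]
    · have hm' : (r - 1) ∈ L := by cases hm with
        | head => exact absurd rfl he
        | tail _ h => exact h
      have hl : l < r - 1 := (List.pairwise_cons.mp hp).1 _ hm'
      rw [tpB, if_neg (by omega), if_pos (by omega),
        List.erase_cons_tail (by simp [beq_iff_eq]; omega),
        ih R r (List.pairwise_cons.mp hp).2 hgt hm',
        tpB_drop_head l _ R (fun r' hr' => by have := hgt r' hr'; omega)]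

theorem tpB_match_hi : ∀ (L : List Int) (R : List Int) (r : Int),
    L.Pairwise (· < ·) → (∀ r' ∈ R, r < r') → (r - 1) ∉ L → r ∉ L → (r + 1) ∈ L →
    tpB L (r :: R) = 1 + tpB (L.erase (r + 1)) R := by
  intro L
  induction L with
  | nil => intro R r _ _ _ _ h; cases h
  | cons l L ih =>
    intro R r hp hgt h1 h0 hm
    by_cases he : l = r + 1
    · subst he
      rw [tpB, if_neg (by omega), if_neg (by omega), List.erase_cons_head]
    · have hm' : (r + 1) ∈ L := by cases hm with
        | head => exact absurd rfl he
        | tail _ h => exact h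
      have hlt : l < r + 1 := (List.pairwise_cons.mp hp).1 _ hm'
      have hne1 : l ≠ r - 1 := fun h => h1 (h ▸ List.mem_cons_self)
      have hne0 : l ≠ r := fun h => h0 (h ▸ List.mem_cons_self)
      have hl : l < r - 1 := by omega
      rw [tpB, if_neg (by omega), if_pos (by omega),
        List.erase_cons_tail (by simp [beq_iff_eq]; omega),
        ih R r (List.pairwise_cons.mp hp).2 hgt (fun h => h1 (List.mem_cons_of_mem _ h))
          (fun h => h0 (List.mem_cons_of_mem _ h)) hm',
        tpB_drop_head l _ R (fun r' hr' => by have := hgt r' hr'; omega)]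

theorem tpB_skip : ∀ (L : List Int) (R : List Int) (r : Int),
    L.Pairwise (· < ·) → (r - 1) ∉ L → r ∉ L → (r + 1) ∉ L → (∀ r' ∈ R, r < r') →
    tpB L (r :: R) = tpB L R := by
  intro L
  induction L with
  | nil => intro R r _ _ _ _ _; cases R <;> simp [tpB]
  | cons l L ih =>
    intro R r hp h1 h0 h2 hR
    have hne1 : l ≠ r - 1 := fun h => h1 (h ▸ List.mem_cons_self)
    have hne0 : l ≠ r := fun h => h0 (h ▸ List.mem_cons_self)
    have hne2 : l ≠ r + 1 := fun h => h2 (h ▸ List.mem_cons_self)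
    by_cases hlo : l < r - 1
    · rw [tpB, if_neg (by omega), if_pos (by omega)]
      rw [ih R r (List.pairwise_cons.mp hp).2 (fun h => h1 (List.mem_cons_of_mem _ h))
        (fun h => h0 (List.mem_cons_of_mem _ h)) (fun h => h2 (List.mem_cons_of_mem _ h)) hR]
      cases R with
      | nil => simp [tpB_nil_right]
      | cons r' R' =>
        have hr' : r < r' := hR r' List.mem_cons_self
        rw [tpB, if_neg (by omega), if_pos (by omega)]
    · have hhi : r + 1 < l := by omega
      rw [tpB, if_pos (by omega)]

theorem gA_eq_tpB : ∀ (R : List Int) (L : List Int),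
    L.Pairwise (· < ·) → R.Pairwise (· < ·) → (∀ x ∈ L, x ∉ R) →
    gA L R = tpB L R := by
  intro R
  induction R with
  | nil => intro L _ _ _; cases L <;> simp [gA, tpB]
  | cons r R ih =>
    intro L hL hR hd
    have hRp := List.pairwise_cons.mp hR
    have hr0 : r ∉ L := fun h => hd r h List.mem_cons_self
    simp only [gA]
    by_cases h1 : (r - 1) ∈ L
    · rw [if_pos h1, tpB_match_lo L R r hL hRp.1 h1,
        ih (L.erase (r - 1)) (hL.sublist (List.erase_sublist))
          hRp.2
          (fun x hx hxR => hd x (List.mem_of_mem_erase hx) (List.mem_cons_of_mem _ hxR))]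
    · rw [if_neg h1]
      by_cases h2 : (r + 1) ∈ L
      · rw [if_pos h2, tpB_match_hi L R r hL hRp.1 h1 hr0 h2,
          ih (L.erase (r + 1)) (hL.sublist (List.erase_sublist))
            hRp.2
            (fun x hx hxR => hd x (List.mem_of_mem_erase hx) (List.mem_cons_of_mem _ hxR))]
      · rw [if_neg h2, tpB_skip L R r hL h1 hr0 h2 hRp.1,
          ih L hL hRp.2 (fun x hx hxR => hd x hx (List.mem_cons_of_mem _ hxR))]

-- sorted of a Nodup list is strictly increasing
theorem sorted_lt_of_nodup (xs : List Int) (h : xs.Nodup) :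
    (PySem.List.sorted xs (fun x => x) false).Pairwise (· < ·) := by
  have hle := PySem.List.sorted_pairwise (xs := xs) (key := fun x => x)
  have hnd : (PySem.List.sorted xs (fun x => x) false).Nodup :=
    (PySem.List.sorted_perm xs (fun x => x) false).nodup_iff.mpr h
  exact (hle.and hnd).imp (fun h => lt_of_le_of_ne h.1 h.2)

-- ===== VERDICT (by name: the statement is the Claim_ definition above) =====
theorem solution_spec : Claim_equal_solution := by
  intro n lost reserve _
  show solution n lost reserve = solution_alt n lost reserve
  unfold solution solution_alt
  simp only [foldA_eq]
  set L0 : List Int := PySem.Set.diff (PySem.Set.ofList lost) (PySem.Set.ofList reserve) with hL0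
  set Rs : List Int :=
    PySem.List.sorted (PySem.Set.diff (PySem.Set.ofList reserve) (PySem.Set.ofList lost)) (fun x => x) false with hRs
  set Ls : List Int := PySem.List.sorted L0 (fun x => x) false with hLs
  have hperm : L0.Perm Ls := (PySem.List.sorted_perm L0 (fun x => x) false).symm
  have hlen : Ls.length = L0.length := hperm.length_eq.symm
  have hndL : L0.Nodup := PySem.Set.nodup_diff _ _ (PySem.Set.nodup_ofList lost)
  have hndR : (PySem.Set.diff (PySem.Set.ofList reserve) (PySem.Set.ofList lost)).Nodup :=
    PySem.Set.nodup_diff _ _ (PySem.Set.nodup_ofList reserve)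
  have hdisj : ∀ x ∈ Ls, x ∉ Rs := by
    intro x hx hxR
    have hx1 : x ∈ L0 := hperm.mem_iff.mpr hx
    have hx2 : x ∈ PySem.Set.diff (PySem.Set.ofList reserve) (PySem.Set.ofList lost) :=
      (PySem.List.mem_sorted _ _ _ _).mp hxR
    have h1 := (PySem.Set.mem_diff _ _ _).mp hx1
    have h2 := (PySem.Set.mem_diff _ _ _).mp hx2
    exact h1.2 h2.1
  rw [gA_perm Rs hperm, gA_eq_tpB Rs Ls (sorted_lt_of_nodup L0 hndL)
    (sorted_lt_of_nodup _ hndR) hdisj, hlen]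
  omega
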